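/-
  RESIDUES, MAPPINGS, MODES, THE TEMP ESTIMATE, AND decode_residue's LOOP VOCABULARY  (unit Q6 of design/WORKPLAN.md §2)

  The clauses R1–R9, MP1–MP6, MD1–MD2, T1, T3 of design/INVARIANTS.md (§2, §3.4, §3.5) as Lean definitions about the flat memory,
  with the lemmas the machine-level proofs need: USE (a clause + an index bound ⇒ the `Site` of a check site), FRAME (ONE
  two-address lemma `transfer` per group, with its instances `frame` and `reblk`), ESTABLISH (the partially built states inside
  start_decoder's loops, with their step lemmas), and the pure arithmetic of the region. About the FIXED source (FIXES.diff v3):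
  `Mapping` is 56 bytes with `submap_floor[16]` at +17 and `submap_residue[16]` at +33 (FIX 8), the estimate uses the per-residue
  type-2 actual_size (FIX 9), the final test has `+ 2*ARENA_REDZONE` (ARENA-FIX 1), `effective <= 0` returns (FIX 10).
  Worked examples of every item: Vorbis/ResidueMappingTest.lean.        `import Vorbis.ResidueMapping`, `open X86 X86.User Asan Vorbis`.

  FILES (all under Vorbis/ResidueMapping/)
      Arith.lean          pure `Nat` arithmetic, namespace `Vorbis.Res`
      Residue.lean        `ResidueAtOK`, `ResidueOK`, `ResidueUpTo`; USE lemmas (`site_…`); `RowPtr`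
      ResidueFrame.lean   `wins` / `Reads` / `Owns` / `transfer` / `frame` / `reblk` of `ResidueOK`, `ResidueUpTo`, `ResidueAtOK`; R9
                          `ResidueDeinitOK`; `ResidueZeroFrom`; `ResBooksUpTo`, `RowsUpTo`, `RowBytesFrom`
      Mapping.lean        `MappingAtOK`, `MappingOK`, `MappingUpTo`, `MappingDeinitOK`; `ModeOK`, `ModeUpTo`; USE; `transfer` …
      Temp.lean           `T1` (`T1.wins`, `T1.Reads`, `T1.transfer`), `T3_decode_residue`, `T3_inverse_mdct`, `maxPartRead`
      DecodeResidue.lean  `TempRows`, `slot`, `Fill`, `WInv` (WA / WB), `WInnerInv`, `InterAt` (CI), `Residue.factK`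

  0. THE SHARED VOCABULARY is Vorbis/Blocks.lean (its header is the documentation). What this unit uses of it:
       Blk : Block → Prop      "is an allocated block": the FIRST parameter of every structure with a SHAPE clause
                               (`Blk ⟨p, n⟩` = INVARIANTS' `Block(p, n)`); laws `BlkOK Blk` (in the data space; equal or disjoint:
                               `hok.kept_store`), `BlkLive Blk Live` (allocated ⇒ live: asked by USE lemmas ONLY).
       Site Live a n           THE result of every USE lemma:   have s := h.site_… hL … ha      (ha : a = <accessor form>, LAST; `rfl`
                               or `by simp only [vacc, voff]`)  then  s.acc hc / s.acc_addr hc (rdi = addr a) / s.acc_range hc /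
                               s.has hc hL / s.inside hc.  A field of `*f` itself: `(hob : Blk (objBlock f))`.
       B.Kept mem mem'         what a frame lemma asks of a block whose CONTENT is read (`.of_writeLE`, `.of_sameExcept`, `hm.kept`)
       ObjEq ws mem p mem' f   what it asks of the decoder object: the windows `ws` of the object at `f` in `mem'` read as those of
                               the object at `p` in `mem`. From `ObjSame f mem mem'` / `DecodeSame f mem mem'`: `hs.sub (by decide)`;
                               from the struct copy: `ObjEq.of_copied hcp (by decide)` / `hm.objEq (by decide)`.
       bsize mem f 1 (= b1)    nchan mem f (= C)     the ONE spelling of the two sizes (T1, T3, MP2, `site_channel_buffer`).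
     THE FRAME LEMMA OF A GROUP `P` ∈ {ResidueOK, ResidueDeinitOK, MappingOK, MappingDeinitOK, ModeOK, T1}:
       P.transfer (h : P Blk mem p) (he : ObjEq P.wins mem p mem' f) (hk : ∀ B, P.Reads mem p B → B.Kept mem mem')
                  (hB : ∀ B, P.Owns mem p B → Blk B → Blk' B) : P Blk' mem' f
       P.frame h (hs : ObjSame f mem mem') hk : P Blk mem' f        P.reblk h hB : P Blk' mem f        (the two instances)
       P.owns_blk h hO : Blk B        P.reads_blk h … hR : Blk B        (`hk` from `AllKept` / `Move.kept` through `reads_blk`)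
       (`reblk` and `owns_blk`: ResidueOK and MappingOK, the two groups whose every owned block is allocated; R9 / H5 mention
       blocks that may be NULL, so they have `reads_blk` / nothing.)
       windows   ResidueOK.wins = ResidueDeinitOK's = [(160,176),(320,464)]   MappingOK.wins = [(4,8),(176,180),(320,324),(464,480)]
                 MappingDeinitOK.wins = [(464,480)]   ModeOK.wins = [(464,468),(480,868)]   T1.wins = [(4,8),(12,16),(156,160),(320,464)]
       ModeOK has neither `hk` nor `hB` (everything it reads is in `*f`); T1 has no `hB`, reads the `residue_config` block (owned by
       ResidueOK: `T1.Reads.owned`) and takes R1's bound `h1`; `ResidueOK.Reads` = `ResidueOK.Owns` + CB0's codebooks block (owned by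
       the codebook group: `reads_blk` takes it as `hcb`); `MappingOK.Reads` = `MappingOK.Owns`.

  1. RESIDUES.  `r = stb_vorbis.residue_config_at mem f i`;  derived reads (all `@[vacc]`):
       Residue.cbk mem f r = f->codebooks + r->classbook      Residue.E mem f r = cbk.entries (Nat)      Residue.W mem f r = cbk.dimensions (Nat)
       Residue.book mem r c k = r->residue_books[c][k] : Int  (i16 at residue_books + 16c + 2k)          Residue.row mem r q = r->classdata[q]
     ResidueAtOK Blk mem f r      fields R4 R5 R6 R7 R7b R8 R8c R8a R8a_row R8b         (one record)
     ResidueOK Blk mem f          fields R1 R2 R3 record;  h.R4 i hi … h.R7b i hi       (hi : (i : Int) < stb_vorbis.residue_count mem f)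
     ResidueDeinitOK Blk mem f    R9 = H3;  ResidueOK.deinit, ResidueUpTo.deinit (every error exit), .site_record, .site_classdata, .classbook_lt
     USE   ResidueOK.site_record hL h hi off n hoff hn ha : Site Live a n      (ha : a = residue_config_at mem f i + off)     residue_config[i]
           ResidueOK.site_type hL hob h1 hi ha             f->residue_types[i]
           ResidueAtOK.site_classdata hL h hq ha           r->classdata[q]            (q < E)
           ResidueAtOK.site_row hL h hq hk ha              r->classdata[q][k]         (k < W)
           ResidueAtOK.site_book hL h hcl hk ha            r->residue_books[c][pass]  (c < classifications, pass < 8)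
           ResidueAtOK.site_cbk / site_book_codebook (given CB0's block `hcb`) / book_lt    the class book; the book `b ≥ 0`; `b < codebook_count`
           RowPtr mem f r v  (ROWPTR)   RowPtr.site (v + i, i < W)   RowPtr.class_lt (the byte read < classifications)
     FRAME ResidueOK.transfer / .frame / .reblk (see 0.);  one record: ResidueAtOK.frame h hrd hk hB with
           hrd : ResidueReads mem p mem' f r := ResidueReads.of_kept he hr hcbk   (the record does not move, the object may);  RowPtr.frame
     ESTABLISH  ResidueUpTo Blk mem f n (= RES(n)) .zero .succ .toOK .transfer .frame, and .transfer_below over `ResidueUpTo.wins n`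
           (`residue_types` only below the counter: the store `f->residue_types[n] = …` keeps RES(n));
           ResidueZeroFrom mem f n (.of_bytes from the memset);
           ResBooksUpTo mem f r j k (.zero .step .next_row .done; Residue.book_writeLE_other / _same; BookOK.minus_one / .of_byte);
           RowsUpTo Blk mem f r j, RowBytesFrom mem f r j k (.init .step; RowsUpTo.succ .done .frame);  ResidueAtOK.assemble

  2. MAPPINGS, MODES.  `m = stb_vorbis.mapping_at mem f i`;  per-index clauses `Mapping.CouplingOK mem f m k`, `Mapping.MuxOK mem m j`,
     `Mapping.SubmapOK mem f m s`, `ModeRecOK mem f i` (carried below a counter with `Res.forall_lt_succ`).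
     MappingAtOK Blk mem f m      fields MP2 MP3 MP4_steps MP4 MP5 MP6              MappingOK: MP1 MP1_block record;  h.MP3 / MP5 / MP6 i hi …
     ModeOK mem f                 fields MD1 MD2;  ModeOK.mapping_lt, .blockflag_le, .mode_index_lt (the mode number is checked)
     MappingDeinitOK Blk mem f    H5;  MappingOK.deinit, MappingUpTo.deinit, .site_record
     USE   MappingOK.site_record, .site_submap_floor (map + 17 + s), .site_submap_residue (map + 33 + s), MappingOK.of_mode
           MappingAtOK.site_chan (chan + 3j + off), .site_chan_step, .magnitude_lt, .angle_lt, .mux_lt, .floor_of_mux_lt, .residue_lt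
           ModeOK.site_mode hL hob … (f + 484 + 6i + off);  site_channel_buffer (channel_buffers[c][k], k < n ≤ b1; M6 as a hypothesis),
           site_channel_buffer_slot hL hob …
     FRAME MappingOK.transfer / .frame / .reblk, ModeOK.transfer / .frame, MappingDeinitOK.transfer / .frame;  one record: MappingAtOK.frame
     ESTABLISH  MappingUpTo (.zero .succ .toOK .transfer .frame), ModeUpTo (.zero .succ .toOK .transfer .frame, .transfer_below over
           `ModeUpTo.wins n`: the stores into `mode_config[n]` keep it), MappingAtOK.assemble

  3. T1, T3.  T1 mem f : temp_memory_required = Res.tempRequired C P b1, C = nchan mem f, b1 = bsize mem f 1,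
       P = maxPartRead mem f residue_count (FIX 9 inside).
       T3_decode_residue hT1 hR hrn hn : C · (8 + 8 · Residue.partReadDec mem f rn n) ≤ temp_memory_required      (2·n ≤ b1)
       T3_inverse_mdct;  T1.mod8, T1.le, T1.transfer, T1.frame, T1.of_loop, maxPartRead_succ;   pure: Res.partRead_mono, Res.T3_request, Res.final_test

  4. decode_residue.  TempRows mem TB C PRD (.site_rowptr .site_slot from `hTB : TB.live Live` = `ArenaOK.tblock_live`; .slot_eq
       .store_slot .frame),  slot TB C PRD j cs,
       Fill mem f r TB C PRD j m (.zero .mono .step .keep .store .store_other .frame),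
       WInv … Rows pass cs pcount  (WA: Rows = rowsA; WB: Rows = rowsB mem dnd ch) .init0 .initK .slot_lt .enter0 .enterK .exit_fill .frame
       WInnerInv … pass cs i pcount  .rowptr .slot_lt .step .leave .frame           pure: Res.WHead, Res.WInner, Res.ceilDiv (KK)
       Residue.factK / factK_buffer / factK_pos   fact K: offsets ≤ actual_size ≤ 2n ≤ b1
       InterAt mem cp pp ch len (CI) .c_lt .p_le .frame .of_z;   pure: Res.InterOK (.of_z .of_z2 .p_lt .step .next), Res.clamp_ok (FIX 5 + 10),
       Res.DeintInv, Res.DeintInner (.init .store_ok .step .done), Res.deint_measure, Res.mult_index_lt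
-/
import Vorbis.ResidueMapping.DecodeResidue
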